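-- pv_equiv track=rewrite | github.com/skalenjr/POS_Tagger | tagger.py | makeWordsTagTable
-- ===== SOURCE A (Python) =====
-- def makeWordsTagTable(words, tags, taglist, wordlist):
--     wordtagtable = [0] * len(taglist)
--     for i in range(len(taglist)):
--         wordtagtable[i] = [0] * len(wordlist)
--     index = 0
--     for word in words:
--         y = wordlist.index(word)
--         tag = tags[index]
--         x = taglist.index(tag)
--         wordtagtable[x][y] += 1
--         index += 1
--     return wordtagtable
-- ===== SOURCE B (Python) =====
-- def makeWordsTagTable(words, tags, taglist, wordlist):
--     # pass 1: count distinct (tag, word) pairs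
--     counts = {}
--     for i in range(len(words)):
--         pair = (tags[i], words[i])
--         counts[pair] = counts.get(pair, 0) + 1
--     # pass 2: fill the zero matrix once per distinct pair
--     matrix = [[0] * len(wordlist) for _ in range(len(taglist))]
--     for (tag, word), c in counts.items():
--         matrix[taglist.index(tag)][wordlist.index(word)] += c
--     return matrix
-- ===== Notes on version B (the rewrite author's own statement) =====
-- stated objective: alternative
-- what changed: replaces A's single streaming per-occurrence increment loop by a two-pass count-then-fill decomposition: first a dict counting distinct (tag, word) pairs, then one .index-addressed matrix update per distinct pair
import Mathlib
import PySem

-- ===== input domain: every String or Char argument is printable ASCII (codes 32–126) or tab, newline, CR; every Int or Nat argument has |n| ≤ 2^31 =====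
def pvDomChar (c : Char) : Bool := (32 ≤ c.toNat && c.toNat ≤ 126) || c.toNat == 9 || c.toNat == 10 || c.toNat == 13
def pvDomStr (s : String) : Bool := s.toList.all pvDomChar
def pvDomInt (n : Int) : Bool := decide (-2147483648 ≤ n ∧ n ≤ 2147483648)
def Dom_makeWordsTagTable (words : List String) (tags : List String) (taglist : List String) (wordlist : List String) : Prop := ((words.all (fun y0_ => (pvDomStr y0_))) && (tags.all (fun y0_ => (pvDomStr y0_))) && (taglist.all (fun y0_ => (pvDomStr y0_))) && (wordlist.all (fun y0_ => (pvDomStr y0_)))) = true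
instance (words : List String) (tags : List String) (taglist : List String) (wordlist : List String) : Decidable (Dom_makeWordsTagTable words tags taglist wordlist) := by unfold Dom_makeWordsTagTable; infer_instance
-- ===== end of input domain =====

-- B replaces A's single streaming per-occurrence increment loop by a two-pass
-- count-then-fill decomposition (count distinct (tag, word) pairs, then one
-- .index-addressed update per distinct pair); equal cost, different structure.

-- ===== PORT A =====
def makeWordsTagTable (words : List String) (tags : List String) (taglist : List String) (wordlist : List String) : List (List Int) :=
  (words.foldl
    (fun (st : List (List Int) × Int) word =>
      match PySem.List.index? wordlist word with
      | none => (st.1, st.2 + 1)      -- Python: ValueError (excluded by Pre_)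
      | some y =>
        match PySem.List.pyGet? tags st.2 with
        | none => (st.1, st.2 + 1)    -- Python: IndexError (excluded by Pre_)
        | some tag =>
          match PySem.List.index? taglist tag with
          | none => (st.1, st.2 + 1)  -- Python: ValueError (excluded by Pre_)
          | some x => (st.1.modify x (fun row => row.modify y (· + 1)), st.2 + 1))
    ((List.range taglist.length).map (fun _ => List.replicate wordlist.length (0 : Int)), (0 : Int))).1

-- ===== PORT B =====
def makeWordsTagTable_alt (words : List String) (tags : List String) (taglist : List String) (wordlist : List String) : List (List Int) :=
  (((PySem.List.pyRange 0 (words.length : Int) 1).foldl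
      (fun (d : PySem.Dict (String × String) Int) i =>
        match PySem.List.pyGet? tags i, PySem.List.pyGet? words i with
        | some t, some w => d.insert (t, w) (d.getD (t, w) 0 + 1)
        | _, _ => d)                  -- Python: IndexError on tags[i] (excluded by Pre_)
      PySem.Dict.empty).items).foldl
    (fun (m : List (List Int)) kv =>
      match PySem.List.index? taglist kv.1.1, PySem.List.index? wordlist kv.1.2 with
      | some x, some y => m.modify x (fun row => row.modify y (· + kv.2))
      | _, _ => m)                    -- Python: ValueError (excluded by Pre_)
    (taglist.map (fun _ => List.replicate wordlist.length (0 : Int)))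

-- ===== PRECONDITION & SPEC =====
-- Pre_ excludes exactly the inputs on which Python A raises: a word missing from
-- wordlist (ValueError), tags shorter than words (IndexError), or a used tag
-- missing from taglist (ValueError); A returns normally on everything else.
def Pre_makeWordsTagTable (words : List String) (tags : List String) (taglist : List String) (wordlist : List String) : Prop :=
  words.length ≤ tags.length ∧ (∀ w ∈ words, w ∈ wordlist) ∧ (∀ t ∈ tags.take words.length, t ∈ taglist)
instance (words : List String) (tags : List String) (taglist : List String) (wordlist : List String) : Decidable (Pre_makeWordsTagTable words tags taglist wordlist) := by unfold Pre_makeWordsTagTable; infer_instance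

def pvWitness_makeWordsTagTable : List String × List String × List String × List String :=
  (["a", "b", "a"], ["N", "V", "N"], ["N", "V"], ["a", "b"])

def Spec_makeWordsTagTable (words : List String) (tags : List String) (taglist : List String) (wordlist : List String) (out : List (List Int)) : Prop := out = makeWordsTagTable_alt words tags taglist wordlist
instance (words : List String) (tags : List String) (taglist : List String) (wordlist : List String) (out : List (List Int)) : Decidable (Spec_makeWordsTagTable words tags taglist wordlist out) := by unfold Spec_makeWordsTagTable; infer_instance

-- ===== CLAIM (what is proved, stated in full; the proofs are below) =====
def Claim_equal_makeWordsTagTable : Prop := ∀ (words : List String) (tags : List String) (taglist : List String) (wordlist : List String), Dom_makeWordsTagTable words tags taglist wordlist → Pre_makeWordsTagTable words tags taglist wordlist → Spec_makeWordsTagTable words tags taglist wordlist (makeWordsTagTable words tags taglist wordlist)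

-- ===== LEMMAS AND PROOFS =====

-- the cell at row x, column y (none if out of range)
def cellv (m : List (List Int)) (x y : Nat) : Option Int := m[x]? >>= fun r => r[y]?

-- one increment of A, abstracted over the looked-up coordinates
def bump (tl wl : List String) (m : List (List Int)) (p : String × String) : List (List Int) :=
  match PySem.List.index? tl p.1, PySem.List.index? wl p.2 with
  | some x, some y => m.modify x (fun row => row.modify y (· + 1))
  | _, _ => m

-- one grouped update of B
def addc (tl wl : List String) (m : List (List Int)) (kv : (String × String) × Int) : List (List Int) :=
  match PySem.List.index? tl kv.1.1, PySem.List.index? wl kv.1.2 with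
  | some x, some y => m.modify x (fun row => row.modify y (· + kv.2))
  | _, _ => m

-- the (x,y)-hit predicate
def hits (tl wl : List String) (x y : Nat) (p : String × String) : Bool :=
  (PySem.List.index? tl p.1 == some x) && (PySem.List.index? wl p.2 == some y)

lemma cellv_modify (m : List (List Int)) (x0 y0 x y : Nat) (f : Int → Int) :
    cellv (m.modify x0 (fun row => row.modify y0 f)) x y
      = if x0 = x ∧ y0 = y then Option.map f (cellv m x y) else cellv m x y := by
  rcases eq_or_ne x0 x with rfl | hx
  · rcases eq_or_ne y0 y with rfl | hy
    · rw [if_pos ⟨rfl, rfl⟩]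
      unfold cellv
      rw [List.getElem?_modify]
      rcases m[x0]? with _ | r
      · simp
      · simp [List.getElem?_modify]
    · rw [if_neg (by tauto)]
      unfold cellv
      rw [List.getElem?_modify]
      rcases m[x0]? with _ | r
      · simp
      · simp [List.getElem?_modify, hy]
  · rw [if_neg (by tauto)]
    unfold cellv
    rw [List.getElem?_modify]
    rcases m[x]? with _ | r <;> simp [hx]

lemma cellv_bump (tl wl : List String) (m : List (List Int)) (p : String × String) (x y : Nat) :
    cellv (bump tl wl m p) x y
      = if hits tl wl x y p then Option.map (· + 1) (cellv m x y) else cellv m x y := by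
  unfold bump hits
  cases h1 : PySem.List.index? tl p.1 with
  | none => simp [h1]
  | some x0 =>
    cases h2 : PySem.List.index? wl p.2 with
    | none => simp [h1, h2]
    | some y0 =>
      simp only [h1, h2]
      rw [cellv_modify]
      by_cases hx : x0 = x <;> by_cases hy : y0 = y <;> simp [hx, hy]

lemma cellv_addc (tl wl : List String) (m : List (List Int)) (kv : (String × String) × Int) (x y : Nat) :
    cellv (addc tl wl m kv) x y
      = if hits tl wl x y kv.1 then Option.map (· + kv.2) (cellv m x y) else cellv m x y := by
  unfold addc hits
  cases h1 : PySem.List.index? tl kv.1.1 with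
  | none => simp [h1]
  | some x0 =>
    cases h2 : PySem.List.index? wl kv.1.2 with
    | none => simp [h1, h2]
    | some y0 =>
      simp only [h1, h2]
      rw [cellv_modify]
      by_cases hx : x0 = x <;> by_cases hy : y0 = y <;> simp [hx, hy]

lemma cellv_foldl_bump (tl wl : List String) (ps : List (String × String)) :
    ∀ (m : List (List Int)) (x y : Nat),
      cellv (ps.foldl (bump tl wl) m) x y
        = Option.map (· + (ps.countP (hits tl wl x y) : Int)) (cellv m x y) := by
  induction ps with
  | nil =>
    intro m x y
    simp only [List.foldl_nil, List.countP_nil, Nat.cast_zero]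
    cases cellv m x y <;> simp
  | cons p ps ih =>
    intro m x y
    rw [List.foldl_cons, ih, cellv_bump, List.countP_cons]
    cases h : hits tl wl x y p with
    | false => simp [h]
    | true =>
      simp only [h, if_true]
      cases cellv m x y <;> simp <;> try push_cast <;> try ring

lemma cellv_foldl_addc (tl wl : List String) (items : List ((String × String) × Int)) :
    ∀ (m : List (List Int)) (x y : Nat),
      cellv (items.foldl (addc tl wl) m) x y
        = Option.map (· + (items.map (fun kv => if hits tl wl x y kv.1 then kv.2 else 0)).sum)
            (cellv m x y) := by
  induction items with
  | nil =>
    intro m x y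
    simp only [List.foldl_nil, List.map_nil, List.sum_nil]
    cases cellv m x y <;> simp
  | cons kv items ih =>
    intro m x y
    rw [List.foldl_cons, ih, cellv_addc, List.map_cons, List.sum_cons]
    cases h : hits tl wl x y kv.1 with
    | false =>
      simp only [h, Bool.false_eq_true, if_false]
      cases cellv m x y <;> simp <;> try ring
    | true =>
      simp only [h, if_true]
      cases cellv m x y <;> simp <;> try ring

lemma length_bump (tl wl : List String) (m : List (List Int)) (p : String × String) :
    (bump tl wl m p).length = m.length := by
  unfold bump
  cases PySem.List.index? tl p.1 with
  | none => rfl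
  | some x =>
    cases PySem.List.index? wl p.2 with
    | none => rfl
    | some y => simp

lemma length_addc (tl wl : List String) (m : List (List Int)) (kv : (String × String) × Int) :
    (addc tl wl m kv).length = m.length := by
  unfold addc
  cases PySem.List.index? tl kv.1.1 with
  | none => rfl
  | some x =>
    cases PySem.List.index? wl kv.1.2 with
    | none => rfl
    | some y => simp

lemma length_foldl_bump (tl wl : List String) (ps : List (String × String)) :
    ∀ (m : List (List Int)), (ps.foldl (bump tl wl) m).length = m.length := by
  induction ps with
  | nil => intro m; rfl
  | cons p ps ih => intro m; rw [List.foldl_cons, ih, length_bump]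

lemma length_foldl_addc (tl wl : List String) (items : List ((String × String) × Int)) :
    ∀ (m : List (List Int)), (items.foldl (addc tl wl) m).length = m.length := by
  induction items with
  | nil => intro m; rfl
  | cons kv items ih => intro m; rw [List.foldl_cons, ih, length_addc]

lemma sum_map_ite_eq_single {α : Type} [BEq α] [LawfulBEq α] (S : List α) (a : α) (v : Int)
    (hnd : S.Nodup) (ha : a ∈ S) :
    (S.map (fun k => if k == a then v else 0)).sum = v := by
  induction S with
  | nil => cases ha
  | cons b S ih =>
    rcases List.nodup_cons.mp hnd with ⟨hb, hnd'⟩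
    rcases List.mem_cons.mp ha with rfl | ha'
    · simp only [List.map_cons, List.sum_cons, BEq.rfl, if_true]
      have h0 : (S.map fun k => if k == a then v else 0).sum = 0 := by
        apply List.sum_eq_zero
        intro z hz
        rcases List.mem_map.mp hz with ⟨k, hk, rfl⟩
        simp only [ite_eq_right_iff]
        intro hk2
        obtain rfl := eq_of_beq hk2
        exact absurd hk hb
      rw [h0, add_zero]
    · have hba : (b == a) = false := by
        rw [beq_eq_false_iff_ne]
        rintro rfl
        exact hb ha'
      simp only [List.map_cons, List.sum_cons, hba, Bool.false_eq_true, if_false, zero_add]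
      exact ih hnd' ha'

lemma sum_count {α : Type} [BEq α] [LawfulBEq α] (q : α → Bool) (ps : List α) (S : List α)
    (hnd : S.Nodup) (hsub : ∀ z ∈ ps, z ∈ S) :
    (S.map (fun k => if q k then (ps.count k : Int) else 0)).sum = (ps.countP q : Int) := by
  induction ps with
  | nil => simp
  | cons a ps ih =>
    have hsub' : ∀ z ∈ ps, z ∈ S := fun z hz => hsub z (List.mem_cons_of_mem _ hz)
    have ha : a ∈ S := hsub a List.mem_cons_self
    have step : (S.map fun k => if q k then (((a :: ps).count k : Nat) : Int) else 0)
        = S.map (fun k => (if q k then ((ps.count k : Nat) : Int) else 0)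
            + (if k == a then (if q a then (1 : Int) else 0) else 0)) := by
      apply List.map_congr_left
      intro k hk
      cases hbeq : k == a with
      | true =>
        obtain rfl := eq_of_beq hbeq
        simp only [List.count_cons_self, BEq.rfl, if_true]
        by_cases hq : q k <;> simp [hq] <;> omega
      | false =>
        have hne : k ≠ a := by simpa using hbeq
        have hc : (a :: ps).count k = ps.count k := by
          rw [List.count_cons]
          simp [Ne.symm hne]
        simp [hc, hbeq]
    rw [step, PySem.List.sum_map_add_int, ih hsub',
      sum_map_ite_eq_single S a _ hnd ha, List.countP_cons]
    by_cases hq : q a <;> simp [hq] <;> omega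

lemma matrices_eq (tl wl : List String) (ps : List (String × String)) (init : List (List Int)) :
    ps.foldl (bump tl wl) init
      = ((PySem.Set.ofList ps).map (fun k => (k, (ps.count k : Int)))).foldl (addc tl wl) init := by
  apply List.ext_getElem?
  intro x
  have hL := length_foldl_bump tl wl ps init
  have hR := length_foldl_addc tl wl ((PySem.Set.ofList ps).map (fun k => (k, (ps.count k : Int)))) init
  by_cases hx : x < init.length
  · have hr := List.getElem?_eq_getElem (l := ps.foldl (bump tl wl) init) (i := x)
      (by rw [hL]; exact hx)
    have hr' := List.getElem?_eq_getElem
      (l := ((PySem.Set.ofList ps).map (fun k => (k, (ps.count k : Int)))).foldl (addc tl wl) init)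
      (i := x) (by rw [hR]; exact hx)
    rw [hr, hr']
    congr 1
    -- rows are equal cell by cell
    ·
      apply List.ext_getElem?
      intro y
      have cL := cellv_foldl_bump tl wl ps init x y
      have cR := cellv_foldl_addc tl wl ((PySem.Set.ofList ps).map (fun k => (k, (ps.count k : Int)))) init x y
      have hsum : (((PySem.Set.ofList ps).map (fun k => (k, (ps.count k : Int)))).map
            (fun kv => if hits tl wl x y kv.1 then kv.2 else 0)).sum
          = (ps.countP (hits tl wl x y) : Int) := by
        have hmm : (((PySem.Set.ofList ps).map (fun k => (k, (ps.count k : Int)))).map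
              (fun kv => if hits tl wl x y kv.1 then kv.2 else 0))
            = (PySem.Set.ofList ps).map
                (fun k => if hits tl wl x y k then (ps.count k : Int) else 0) := by
          rw [List.map_map]
          apply List.map_congr_left
          intro k _
          rfl
        rw [hmm]
        exact sum_count (hits tl wl x y) ps (PySem.Set.ofList ps)
          (PySem.Set.nodup_ofList ps) (fun z hz => (PySem.Set.mem_ofList ps z).mpr hz)
      rw [hsum] at cR
      have hcell : cellv (ps.foldl (bump tl wl) init) x y
          = cellv (((PySem.Set.ofList ps).map (fun k => (k, (ps.count k : Int)))).foldl (addc tl wl) init) x y := by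
        rw [cL, cR]
      unfold cellv at hcell
      rw [hr, hr'] at hcell
      simpa using hcell
  · rw [List.getElem?_eq_none (by omega), List.getElem?_eq_none (by omega)]

lemma A_loop (tl wl tags : List String) :
    ∀ (ws : List String) (idx : Nat) (m : List (List Int)),
      idx + ws.length ≤ tags.length →
      (∀ w ∈ ws, w ∈ wl) →
      (∀ t ∈ (tags.drop idx).take ws.length, t ∈ tl) →
      (ws.foldl
        (fun (st : List (List Int) × Int) word =>
          match PySem.List.index? wl word with
          | none => (st.1, st.2 + 1)
          | some y =>
            match PySem.List.pyGet? tags st.2 with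
            | none => (st.1, st.2 + 1)
            | some tag =>
              match PySem.List.index? tl tag with
              | none => (st.1, st.2 + 1)
              | some x => (st.1.modify x (fun row => row.modify y (· + 1)), st.2 + 1))
        (m, (idx : Int))).1
        = ((tags.drop idx).zip ws).foldl (bump tl wl) m := by
  intro ws
  induction ws with
  | nil => intro idx m _ _ _; simp
  | cons w rest ih =>
    intro idx m hlen h1 h2
    have hidx : idx < tags.length := by
      simp only [List.length_cons] at hlen; omega
    have hw : w ∈ wl := h1 w List.mem_cons_self
    obtain ⟨y, hy⟩ := Option.isSome_iff_exists.mp ((PySem.List.index?_isSome_iff wl w).mpr hw)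
    have hdrop : tags.drop idx = tags[idx] :: tags.drop (idx + 1) :=
      List.drop_eq_getElem_cons hidx
    have htag : tags[idx] ∈ tl := by
      apply h2
      simp only [List.length_cons]
      rw [hdrop, List.take_succ_cons]
      exact List.mem_cons_self
    obtain ⟨x, hx⟩ := Option.isSome_iff_exists.mp ((PySem.List.index?_isSome_iff tl tags[idx]).mpr htag)
    have hget : PySem.List.pyGet? tags (idx : Int) = some tags[idx] :=
      PySem.List.pyGet?_ofNat tags idx hidx
    rw [List.foldl_cons]
    simp only [hy, hget, hx]
    have hb : bump tl wl m (tags[idx], w) = m.modify x (fun row => row.modify y (· + 1)) := by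
      simp only [bump]
      rw [hx, hy]
    have hcast : (idx : Int) + 1 = ((idx + 1 : Nat) : Int) := by push_cast; ring
    rw [hdrop, List.zip_cons_cons, List.foldl_cons, hb, hcast]
    apply ih (idx + 1)
    · simp only [List.length_cons] at hlen; omega
    · exact fun w' hw' => h1 w' (List.mem_cons_of_mem _ hw')
    · intro t ht
      apply h2
      rw [hdrop]
      simp only [List.length_cons, List.take_succ_cons]
      exact List.mem_cons_of_mem _ ht

lemma B_loop (tags words : List String) (h : words.length ≤ tags.length) :
    ∀ (fuel a : Nat) (d : PySem.Dict (String × String) Int), words.length - a = fuel →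
      (PySem.List.pyRange (a : Int) (words.length : Int) 1).foldl
        (fun (d : PySem.Dict (String × String) Int) i =>
          match PySem.List.pyGet? tags i, PySem.List.pyGet? words i with
          | some t, some w => d.insert (t, w) (d.getD (t, w) 0 + 1)
          | _, _ => d) d
      = ((tags.drop a).zip (words.drop a)).foldl
          (fun d p => d.insert p (d.getD p 0 + 1)) d := by
  intro fuel
  induction fuel with
  | zero =>
    intro a d hfa
    have ha : words.length ≤ a := by omega
    rw [PySem.List.pyRange_one_eq_nil (by exact_mod_cast ha),
      List.drop_eq_nil_of_le ha]
    simp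
  | succ n ihn =>
    intro a d hfa
    have ha : a < words.length := by omega
    have hat : a < tags.length := lt_of_lt_of_le ha h
    rw [PySem.List.pyRange_one_cons (by exact_mod_cast ha), List.foldl_cons]
    have hgt : PySem.List.pyGet? tags (a : Int) = some tags[a] := PySem.List.pyGet?_ofNat tags a hat
    have hgw : PySem.List.pyGet? words (a : Int) = some words[a] := PySem.List.pyGet?_ofNat words a ha
    simp only [hgt, hgw]
    rw [show (a : Int) + 1 = ((a + 1 : Nat) : Int) by push_cast; ring]
    rw [ihn (a + 1) _ (by omega)]
    rw [List.drop_eq_getElem_cons hat, List.drop_eq_getElem_cons ha,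
      List.zip_cons_cons, List.foldl_cons]

-- ===== VERDICT (by name: the statement is the Claim_ definition above) =====
theorem makeWordsTagTable_spec : Claim_equal_makeWordsTagTable := by
  intro words tags taglist wordlist _ hpre
  obtain ⟨hlen, h1, h2⟩ := hpre
  unfold Spec_makeWordsTagTable makeWordsTagTable makeWordsTagTable_alt
  have hA := A_loop taglist wordlist tags words 0
    ((List.range taglist.length).map (fun _ => List.replicate wordlist.length (0 : Int)))
    (by simpa using hlen) h1 (by simpa using h2)
  simp only [Nat.cast_zero, List.drop_zero] at hA
  rw [hA]
  have hB := B_loop tags words hlen words.length 0 PySem.Dict.empty (by omega)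
  simp only [Nat.cast_zero, List.drop_zero] at hB
  rw [hB, PySem.Dict.foldl_insert_getD_add_one_eq_counter, PySem.Dict.items_counter]
  have hinit : (List.range taglist.length).map (fun _ => List.replicate wordlist.length (0 : Int))
      = taglist.map (fun _ => List.replicate wordlist.length (0 : Int)) := by
    simp [List.map_const', List.length_range]
  rw [hinit]
  exact matrices_eq taglist wordlist (tags.zip words)
    (taglist.map (fun _ => List.replicate wordlist.length (0 : Int)))
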